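-- pv_equiv track=rewrite | github.com/alistairewj/bert-deid | bert_deid/utils.py | split_by_token_entity
-- ===== SOURCE A (Python) =====
-- def split_by_token_entity(text, entities, start):
--     """
--     Split a token with conflict entity type
--         i.e. a token "Home/Bangdung" with "Home" as HOSPITAL, "/" as object, "Bangdung" as CITY
--         would be splitted into three tokens: "Home", "/", "Bandung"
--     """
--     prev_type = entities[0]
--     tokens, starts, ends = [], [], []
--     offset = 0
--     for i in range(len(text)):
--         if entities[i] != prev_type:
--             token = text[offset:i]
--             tokens.append(token)
--             starts.append(offset + start)
--             ends.append(offset + len(token) + start)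
--
--             offset += len(token)
--             prev_type = entities[i]
--     last_token = text[offset:len(text)]
--     tokens.append(last_token)
--     starts.append(offset + start)
--     ends.append(offset + len(last_token) + start)
--     return tokens, starts, ends
-- ===== SOURCE B (Python) =====
-- def split_by_token_entity(text, entities, start):
--     # Two phases: collect boundary indices where the entity type changes,
--     # then build all three lists from adjacent boundary pairs.
--     n = len(text)
--     bps = [0] + [i for i in range(1, n) if entities[i] != entities[i - 1]] + [n]
--     tokens = [text[a:b] for a, b in zip(bps, bps[1:])]
--     starts = [a + start for a in bps[:-1]]
--     ends = [b + start for b in bps[1:]]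
--     return tokens, starts, ends
-- ===== Notes on version B (the rewrite author's own statement) =====
-- stated objective: simpler
-- what changed: B replaces A's single-pass accumulator loop (carrying prev_type/offset and appending to three lists in step) with a two-phase decomposition: first collect the boundary indices where the entity label changes, then build tokens, starts and ends by comprehensions over adjacent boundary pairs.
import Mathlib
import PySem

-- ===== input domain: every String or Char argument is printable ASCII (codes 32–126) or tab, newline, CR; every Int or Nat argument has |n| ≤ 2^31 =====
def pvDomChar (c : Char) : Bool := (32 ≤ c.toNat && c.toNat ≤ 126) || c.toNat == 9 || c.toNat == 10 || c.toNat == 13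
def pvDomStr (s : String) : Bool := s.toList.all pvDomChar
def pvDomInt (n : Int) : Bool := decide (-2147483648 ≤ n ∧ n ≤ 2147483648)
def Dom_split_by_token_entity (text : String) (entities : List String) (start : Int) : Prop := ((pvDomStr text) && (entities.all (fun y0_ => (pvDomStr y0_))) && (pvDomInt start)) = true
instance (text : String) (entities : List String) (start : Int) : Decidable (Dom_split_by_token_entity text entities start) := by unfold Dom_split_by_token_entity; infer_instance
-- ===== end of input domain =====

-- B collects the entity-change boundary indices in one pass, then builds tokens/starts/ends
-- by comprehensions over adjacent boundary pairs (simpler decomposition; same return value).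

-- ===== PORT A =====
-- transliteration of A: single loop carrying (prev_type, tokens, starts, ends, offset);
-- entities[i] is ported as PySem.List.pyGetD (in range on every input Pre_ admits)
def split_by_token_entity (text : String) (entities : List String) (start : Int) : List String × List Int × List Int :=
  let prev_type := PySem.List.pyGetD entities 0 ""
  let st := (PySem.List.pyRange 0 (PySem.Str.len text) 1).foldl
    (fun (st : String × List String × List Int × List Int × Int) i =>
      let (prev, tokens, starts, ends, offset) := st
      if PySem.List.pyGetD entities i "" ≠ prev then
        let token := PySem.Str.slice text (some offset) (some i)
        (PySem.List.pyGetD entities i "",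
         tokens ++ [token],
         starts ++ [offset + start],
         ends ++ [offset + PySem.Str.len token + start],
         offset + PySem.Str.len token)
      else st)
    (prev_type, ([] : List String), ([] : List Int), ([] : List Int), (0 : Int))
  let last_token := PySem.Str.slice text (some st.2.2.2.2) (some (PySem.Str.len text))
  (st.2.1 ++ [last_token],
   st.2.2.1 ++ [st.2.2.2.2 + start],
   st.2.2.2.1 ++ [st.2.2.2.2 + PySem.Str.len last_token + start])

-- ===== PORT B =====
-- transliteration of Source B: boundary list, then comprehensions over adjacent pairs
def split_by_token_entity_alt (text : String) (entities : List String) (start : Int) : List String × List Int × List Int :=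
  let n := PySem.Str.len text
  let bps : List Int := [0] ++ ((PySem.List.pyRange 1 n 1).filter
      (fun i => PySem.List.pyGetD entities i "" ≠ PySem.List.pyGetD entities (i - 1) "")) ++ [n]
  let tokens := (bps.zip (PySem.List.slice bps (some 1) none)).map
      (fun ab => PySem.Str.slice text (some ab.1) (some ab.2))
  let starts := (PySem.List.slice bps none (some (-1))).map (fun a => a + start)
  let ends := (PySem.List.slice bps (some 1) none).map (fun b => b + start)
  (tokens, starts, ends)

-- ===== PRECONDITION & SPEC =====
-- Pre_ excludes exactly the inputs where Python A raises IndexError: empty entities, or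
-- fewer entity labels than characters of text.
def Pre_split_by_token_entity (text : String) (entities : List String) (start : Int) : Prop :=
  entities ≠ [] ∧ text.toList.length ≤ entities.length
instance (text : String) (entities : List String) (start : Int) : Decidable (Pre_split_by_token_entity text entities start) := by unfold Pre_split_by_token_entity; infer_instance
def pvWitness_split_by_token_entity : String × List String × Int := ("ab", ["X", "Y"], 3)

def Spec_split_by_token_entity (text : String) (entities : List String) (start : Int) (out : List String × List Int × List Int) : Prop := out = split_by_token_entity_alt text entities start
instance (text : String) (entities : List String) (start : Int) (out : List String × List Int × List Int) : Decidable (Spec_split_by_token_entity text entities start out) := by unfold Spec_split_by_token_entity; infer_instance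

-- ===== CLAIM (what is proved, stated in full; the proofs are below) =====
def Claim_equal_split_by_token_entity : Prop := ∀ (text : String) (entities : List String) (start : Int), Dom_split_by_token_entity text entities start → Pre_split_by_token_entity text entities start → Spec_split_by_token_entity text entities start (split_by_token_entity text entities start)


-- ===== LEMMAS AND PROOFS =====

def pvE (entities : List String) (i : Int) : String := PySem.List.pyGetD entities i ""

def pvF (entities : List String) : Nat → List Int
  | 0 => []
  | n+1 => pvF entities n ++
      (if 1 ≤ n ∧ pvE entities (n : Int) ≠ pvE entities ((n : Int) - 1) then [(n : Int)] else [])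

def pvLam (entities : List String) (n : Nat) : Int := (pvF entities n).getLastD 0

def pvSeg (text : String) (a b : Int) : String := PySem.Str.slice text (some a) (some b)

def pvStep (entities : List String) (text : String) (start : Int)
    (st : String × List String × List Int × List Int × Int) (i : Int) :
    String × List String × List Int × List Int × Int :=
  let (prev, tokens, starts, ends, offset) := st
  if PySem.List.pyGetD entities i "" ≠ prev then
    let token := PySem.Str.slice text (some offset) (some i)
    (PySem.List.pyGetD entities i "",
     tokens ++ [token],
     starts ++ [offset + start],
     ends ++ [offset + PySem.Str.len token + start],
     offset + PySem.Str.len token)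
  else st

theorem pvLenSeg (text : String) (a b : Int) (h0 : 0 ≤ a) (hab : a ≤ b)
    (hb : b ≤ (text.toList.length : Int)) :
    PySem.Str.len (pvSeg text a b) = b - a := by
  have ha' : a = ((a.toNat : Nat) : Int) := by omega
  have hb' : b = ((b.toNat : Nat) : Int) := by omega
  rw [pvSeg, PySem.Str.slice, PySem.Str.len, String.toList_ofList,
      PySem.Chars.slice_eq_listSlice, ha', hb', PySem.List.length_slice,
      PySem.List.clampIdx_natCast, PySem.List.clampIdx_natCast]
  omega

theorem pvZipConcat (l : List Int) (a x : Int) :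
    ((a :: l) ++ [x]).zip (l ++ [x]) = ((a :: l).zip l) ++ [(l.getLastD a, x)] := by
  induction l generalizing a with
  | nil => simp
  | cons b t ih =>
    simp only [List.cons_append, List.zip_cons_cons] at *
    rw [ih b]
    simp only [List.append_cancel_left_eq, List.cons.injEq, Prod.mk.injEq, and_true]
    exact ⟨trivial, List.getLastD_cons.symm⟩

theorem pvFilter_eq (entities : List String) (n : Nat) :
    (PySem.List.pyRange 1 (n : Int) 1).filter
        (fun i => PySem.List.pyGetD entities i "" ≠ PySem.List.pyGetD entities (i - 1) "")
      = pvF entities n := by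
  induction n with
  | zero => simp [pvF, PySem.List.pyRange_one_eq_nil]
  | succ n ih =>
    match n, ih with
    | 0, _ => simp [pvF, PySem.List.pyRange_one_eq_nil]
    | Nat.succ m, ih =>
      have h1 : (1 : Int) ≤ ((m + 1 : Nat) : Int) := by push_cast; omega
      have hcast : (((m + 1 + 1 : Nat)) : Int) = ((m + 1 : Nat) : Int) + 1 := by push_cast; ring
      rw [pvF, hcast, PySem.List.pyRange_one_succ_right h1, List.filter_append, ih]
      by_cases h : pvE entities ((m + 1 : Nat) : Int) ≠ pvE entities (((m + 1 : Nat) : Int) - 1)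
      · simp [pvE] at h
        simp [h, pvE]
      · simp [pvE] at h
        simp [h, pvE]

theorem pvInv (text : String) (entities : List String) (start : Int) (n : Nat)
    (hn : n ≤ text.toList.length) :
    (PySem.List.pyRange 0 (n : Int) 1).foldl (pvStep entities text start)
        (PySem.List.pyGetD entities 0 "", ([] : List String), ([] : List Int), ([] : List Int), (0 : Int)) =
      (pvE entities (pvLam entities n),
       ((0 :: pvF entities n).zip (pvF entities n)).map (fun ab => pvSeg text ab.1 ab.2),
       ((0 :: pvF entities n).dropLast).map (fun a => a + start),
       (pvF entities n).map (fun b => b + start),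
       pvLam entities n)
    ∧ 0 ≤ pvLam entities n ∧ (pvLam entities n < n ∨ pvLam entities n = 0)
    ∧ pvLam entities n ≤ n
    ∧ (∀ j : Int, pvLam entities n ≤ j → j < n → pvE entities j = pvE entities (pvLam entities n)) := by
  induction n with
  | zero =>
    refine ⟨?_, by simp [pvLam, pvF], by simp [pvLam, pvF], by simp [pvLam, pvF], ?_⟩
    · simp [pvLam, pvF, pvE, PySem.List.pyRange_one_eq_nil]
    · intro j h1 h2
      simp [pvLam, pvF] at h1 h2
      omega
  | succ n ih =>
    have hn' : n ≤ text.toList.length := by omega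
    obtain ⟨hfold, hlam0, hlamlt, hlamle, hQ⟩ := ih hn'
    have hcast : ((n + 1 : Nat) : Int) = ((n : Nat) : Int) + 1 := by push_cast; ring
    rw [hcast, PySem.List.pyRange_one_succ_right (by positivity), List.foldl_append, hfold]
    simp only [List.foldl_cons, List.foldl_nil]
    by_cases hc : PySem.List.pyGetD entities (n : Int) "" ≠ pvE entities (pvLam entities n)
    · -- a boundary at n: entities[n] differs from prev
      have hne0 : 1 ≤ n := by
        rcases Nat.eq_zero_or_pos n with h0 | h1
        · exfalso
          subst h0
          exact hc (by simp [pvLam, pvF, pvE])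
        · omega
      have hlamn : pvLam entities n ≤ (n : Int) - 1 := by
        rcases hlamlt with h | h
        · omega
        · rw [h]; push_cast; omega
      have hprev : pvE entities ((n : Int) - 1) = pvE entities (pvLam entities n) :=
        hQ _ hlamn (by omega)
      have hcn : pvE entities (n : Int) ≠ pvE entities ((n : Int) - 1) := by
        rw [hprev]; exact hc
      have hF : pvF entities (n + 1) = pvF entities n ++ [(n : Int)] := by
        rw [pvF, if_pos ⟨hne0, hcn⟩]
      have hLam : pvLam entities (n + 1) = (n : Int) := by
        rw [pvLam, hF, List.getLastD_concat]
      have hlen : PySem.Str.len (PySem.Str.slice text (some (pvLam entities n)) (some (n : Int)))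
          = (n : Int) - pvLam entities n := by
        exact pvLenSeg text _ _ hlam0 (by omega) (by push_cast; omega)
      rw [pvStep, if_pos hc]
      refine ⟨?_, by omega, by left; rw [hLam]; push_cast; omega, by rw [hLam]; push_cast; omega, ?_⟩
      · simp only [hF, hLam, hlen, Prod.mk.injEq]
        refine ⟨by rw [pvE], ?_, ?_, ?_, by omega⟩
        · -- tokens
          have := pvZipConcat (pvF entities n) 0 (n : Int)
          rw [← List.cons_append, this, List.map_append]
          simp [pvSeg, pvLam]
        · -- starts
          have hkey : (0 :: pvF entities n).dropLast ++ [pvLam entities n] = 0 :: pvF entities n := by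
            have hne : (0 :: pvF entities n) ≠ [] := by simp
            have := List.dropLast_append_getLast hne
            rwa [List.getLast_eq_getLastD, ← pvLam] at this
          rw [← List.cons_append, List.dropLast_concat, ← hkey, List.map_append]
          simp
        · -- ends
          rw [List.map_append]
          simp only [List.map_cons, List.map_nil, List.append_cancel_left_eq, List.cons.injEq, and_true]
          omega
      · intro j h1 h2
        rw [hLam] at h1 ⊢
        have : j = (n : Int) := by omega
        rw [this]
    · -- no boundary at n
      push_neg at hc
      have hF : pvF entities (n + 1) = pvF entities n := by
        rw [pvF]
        rcases Nat.eq_zero_or_pos n with h0 | h1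
        · subst h0; simp
        · have hlamn : pvLam entities n ≤ (n : Int) - 1 := by
            rcases hlamlt with h | h
            · omega
            · rw [h]; push_cast; omega
          have hprev : pvE entities ((n : Int) - 1) = pvE entities (pvLam entities n) :=
            hQ _ hlamn (by omega)
          have : ¬ (1 ≤ n ∧ pvE entities (n : Int) ≠ pvE entities ((n : Int) - 1)) := by
            intro ⟨_, hcn⟩
            exact hcn (by rw [hprev]; exact hc)
          rw [if_neg this, List.append_nil]
      have hLam : pvLam entities (n + 1) = pvLam entities n := by rw [pvLam, hF, pvLam]
      rw [pvStep, if_neg (by simpa using hc)]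
      refine ⟨by rw [hLam, hF], by omega, by omega, by omega, ?_⟩
      intro j h1 h2
      rw [hLam] at h1 ⊢
      by_cases hj : j < (n : Int)
      · exact hQ j h1 hj
      · have : j = (n : Int) := by omega
        rw [this, ← pvE] at *
        exact hc
theorem pvA_unfold (text : String) (entities : List String) (start : Int) :
    split_by_token_entity text entities start =
      (let st := (PySem.List.pyRange 0 (PySem.Str.len text) 1).foldl (pvStep entities text start)
          (PySem.List.pyGetD entities 0 "", ([] : List String), ([] : List Int), ([] : List Int), (0 : Int))
       let last_token := PySem.Str.slice text (some st.2.2.2.2) (some (PySem.Str.len text))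
       (st.2.1 ++ [last_token],
        st.2.2.1 ++ [st.2.2.2.2 + start],
        st.2.2.2.1 ++ [st.2.2.2.2 + PySem.Str.len last_token + start])) := rfl

theorem pvDropLastKey (l : List Int) : (0 :: l).dropLast ++ [l.getLastD 0] = 0 :: l := by
  have hne : (0 :: l) ≠ [] := by simp
  have := List.dropLast_append_getLast hne
  rwa [List.getLast_eq_getLastD] at this

theorem pvPorts_eq (text : String) (entities : List String) (start : Int) :
    split_by_token_entity text entities start = split_by_token_entity_alt text entities start := by
  obtain ⟨hfold, hlam0, _, hlamle, _⟩ := pvInv text entities start text.toList.length le_rfl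
  have hlen : PySem.Str.len (PySem.Str.slice text (some (pvLam entities text.toList.length))
      (some (text.toList.length : Int))) = (text.toList.length : Int) - pvLam entities text.toList.length :=
    pvLenSeg text _ _ hlam0 (by exact_mod_cast hlamle) le_rfl
  rw [pvA_unfold, split_by_token_entity_alt]
  simp only [PySem.Str.len_eq]
  rw [hfold, pvFilter_eq entities text.toList.length,
      PySem.List.slice_from_one, PySem.List.slice_to_neg_one]
  simp only [List.cons_append, List.nil_append, List.tail_cons]
  have hsplit : (0 : Int) :: (pvF entities text.toList.length ++ [(text.toList.length : Int)])
      = (0 :: pvF entities text.toList.length) ++ [(text.toList.length : Int)] := by simp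
  rw [hsplit, pvZipConcat (pvF entities text.toList.length) 0 (text.toList.length : Int),
      List.dropLast_concat]
  refine Prod.ext ?_ (Prod.ext ?_ ?_)
  · simp only [List.map_append, List.map_cons, List.map_nil]
    rfl
  · show _ ++ [_] = _
    rw [← pvDropLastKey (pvF entities text.toList.length), List.map_append]
    simp [pvLam]
  · show _ ++ [_] = _
    have hlen' : ((PySem.Str.slice text (some (pvLam entities text.toList.length))
        (some (text.toList.length : Int))).toList.length : Int)
        = (text.toList.length : Int) - pvLam entities text.toList.length := by
      have h2 := hlen
      rwa [PySem.Str.len_eq] at h2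
    rw [List.map_append, hlen', List.map_append]
    simp only [List.map_cons, List.map_nil, List.append_cancel_left_eq, List.cons.injEq, and_true]
    ring

-- ===== VERDICT (by name: the statement is the Claim_ definition above) =====
theorem split_by_token_entity_spec : Claim_equal_split_by_token_entity := by
  intro text entities start _ _
  unfold Spec_split_by_token_entity
  exact pvPorts_eq text entities start
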